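-- pv_equiv track=rewrite | github.com/ksheasby-va/PyKata | bowling/bowling.py | split_throws_into_frames
-- ===== SOURCE A (Python) =====
-- def split_throws_into_frames(throws):
--
--     frames = []
--     frame = []
--     balls = 0
--     total = 0
--     for x in throws:
--         if total < 15:
--             frame.append(x)
--             total += x
--             balls += 1
--         else:
--             frame.append(x)
--
--         if total == 15 or balls == 3:
--             frames.append(frame)
--             balls = 0
--             frame = []
--             total = 0
--
--     return frames
-- ===== SOURCE B (Python) =====
-- def split_throws_into_frames(throws):
--     # Closed-form frame rule derived from the scoring: a frame is the shortest
--     # prefix [x] with x == 15, [x, y] with x < 15 and x + y == 15, or the first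
--     # three throws when x < 15 and x + y < 15; any other situation (overshoot
--     # past 15, or not enough throws left) never closes a frame, so we stop.
--     frames = []
--     i = 0
--     n = len(throws)
--     while i < n:
--         x = throws[i]
--         if x == 15:
--             frames.append([x])
--             i += 1
--         elif i + 1 < n and x < 15 and x + throws[i + 1] == 15:
--             frames.append([x, throws[i + 1]])
--             i += 2
--         elif i + 2 < n and x < 15 and x + throws[i + 1] < 15:
--             frames.append([x, throws[i + 1], throws[i + 2]])
--             i += 3
--         else:
--             break
--     return frames
-- ===== Notes on version B (the rewrite author's own statement) =====
-- stated objective: alternative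
-- what changed: Replaces A's stateful single pass (running total/balls counters mutated and reset across iterations) by a closed-form per-frame rule applied to the remaining throws: a frame is the shortest prefix [x] with x==15, [x,y] with x<15 and x+y==15, or the first three throws when x<15 and x+y<15, and any other case (overshoot past 15 or too few throws) stops, matching A's dropped never-closing frame.
import Mathlib
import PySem

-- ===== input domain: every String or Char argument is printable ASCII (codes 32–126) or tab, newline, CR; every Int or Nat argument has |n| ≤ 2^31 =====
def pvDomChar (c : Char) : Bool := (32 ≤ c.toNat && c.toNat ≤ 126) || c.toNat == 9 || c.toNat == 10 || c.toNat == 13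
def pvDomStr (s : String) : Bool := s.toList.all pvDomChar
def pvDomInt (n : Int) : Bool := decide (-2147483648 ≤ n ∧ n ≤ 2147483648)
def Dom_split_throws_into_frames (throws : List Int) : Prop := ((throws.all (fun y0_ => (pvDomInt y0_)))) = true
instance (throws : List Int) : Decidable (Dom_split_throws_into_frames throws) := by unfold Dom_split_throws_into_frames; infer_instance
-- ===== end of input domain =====

-- B replaces A's stateful scan (running total/balls counters, reset on frame close) with a
-- closed-form per-frame rule applied along the list — objective: alternative.

-- ===== PORT A =====
-- state: (frames, frame, balls, total), exactly the Python loop's variables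
def pvStepA (s : List (List Int) × List Int × Int × Int) (x : Int) :
    List (List Int) × List Int × Int × Int :=
  let frames := s.1
  let frame := s.2.1
  let balls := s.2.2.1
  let total := s.2.2.2
  let (frame, total, balls) :=
    if total < 15 then (frame ++ [x], total + x, balls + 1)
    else (frame ++ [x], total, balls)
  if total == 15 || balls == 3 then (frames ++ [frame], [], 0, 0)
  else (frames, frame, balls, total)

def split_throws_into_frames (throws : List Int) : List (List Int) :=
  (throws.foldl pvStepA ([], [], 0, 0)).1

-- ===== PORT B =====
-- Source B's loop over the remaining throws, as the standard recursion over the list: the three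
-- chained prefix checks appear in the same order, matched by remaining length
def split_throws_into_frames_alt : List Int → List (List Int)
  | [] => []
  | [x] => if x == 15 then [[x]] else []
  | [x, y] =>
    if x == 15 then [x] :: split_throws_into_frames_alt [y]
    else if x < 15 && x + y == 15 then [[x, y]]
    else []
  | x :: y :: z :: rest3 =>
    if x == 15 then [x] :: split_throws_into_frames_alt (y :: z :: rest3)
    else if x < 15 && x + y == 15 then [x, y] :: split_throws_into_frames_alt (z :: rest3)
    else if x < 15 && x + y < 15 then [x, y, z] :: split_throws_into_frames_alt rest3
    else []

-- ===== PRECONDITION & SPEC =====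
def Spec_split_throws_into_frames (throws : List Int) (out : List (List Int)) : Prop := out = split_throws_into_frames_alt throws
instance (throws : List Int) (out : List (List Int)) : Decidable (Spec_split_throws_into_frames throws out) := by unfold Spec_split_throws_into_frames; infer_instance

-- ===== CLAIM (what is proved, stated in full; the proofs are below) =====
def Claim_equal_split_throws_into_frames : Prop := ∀ (throws : List Int), Dom_split_throws_into_frames throws → Spec_split_throws_into_frames throws (split_throws_into_frames throws)

-- ===== LEMMAS AND PROOFS =====

-- once A's frame is stuck (total ≥ 15 but ≠ 15, balls ≠ 3), it never closes: frames frozen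
theorem pvStuck : ∀ (l : List Int) (frames : List (List Int)) (frame : List Int)
    (balls total : Int), ¬ total < 15 → (total == 15 || balls == 3) = false →
    (l.foldl pvStepA (frames, frame, balls, total)).1 = frames := by
  intro l
  induction l with
  | nil => intro frames frame balls total _ _; rfl
  | cons x xs ih =>
    intro frames frame balls total h15 hc
    simp only [List.foldl, pvStepA, if_neg h15, hc]
    exact ih frames (frame ++ [x]) balls total h15 hc

theorem pvAlt15 (rest : List Int) :
    split_throws_into_frames_alt (15 :: rest) = [15] :: split_throws_into_frames_alt rest := by
  match rest with
  | [] => simp [split_throws_into_frames_alt]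
  | [y] => simp [split_throws_into_frames_alt]
  | y :: z :: r => simp [split_throws_into_frames_alt]

theorem pvAltStuck1 (x : Int) (rest : List Int) (hx : x ≠ 15) (hxlt : ¬ x < 15) :
    split_throws_into_frames_alt (x :: rest) = [] := by
  match rest with
  | [] => simp [split_throws_into_frames_alt, hx]
  | [y] => simp [split_throws_into_frames_alt, hx, hxlt]
  | y :: z :: r => simp [split_throws_into_frames_alt, hx, hxlt]

theorem pvAltSpare (x y : Int) (rest2 : List Int) (hx : x ≠ 15) (hxlt : x < 15)
    (hxy : x + y = 15) :
    split_throws_into_frames_alt (x :: y :: rest2) = [x, y] :: split_throws_into_frames_alt rest2 := by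
  match rest2 with
  | [] => simp [split_throws_into_frames_alt, hx, hxlt, hxy]
  | z :: r => simp [split_throws_into_frames_alt, hx, hxlt, hxy]

theorem pvMain : ∀ (n : Nat) (l : List Int), l.length ≤ n → ∀ (frames : List (List Int)),
    (l.foldl pvStepA (frames, [], 0, 0)).1 = frames ++ split_throws_into_frames_alt l := by
  intro n
  induction n with
  | zero =>
    intro l hl frames
    have : l = [] := List.eq_nil_of_length_eq_zero (Nat.le_zero.mp hl)
    subst this; simp [split_throws_into_frames_alt]
  | succ n ih =>
    intro l hl frames
    match l with
    | [] => simp [split_throws_into_frames_alt]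
    | x :: rest =>
      -- first throw: total = 0 < 15, so frame := [x], total := x, balls := 1
      simp only [List.foldl, pvStepA]
      norm_num
      by_cases hx : x = 15
      · subst hx
        norm_num
        rw [ih rest (by simp at hl; omega) (frames ++ [[15]]), pvAlt15]
        simp
      · rw [if_neg (by simp [hx])]
        match rest with
        | [] =>
          simp [split_throws_into_frames_alt, hx]
        | y :: rest2 =>
          by_cases hxlt : x < 15
          · -- second throw taken into the running total
            simp only [List.foldl, pvStepA, if_pos hxlt]
            norm_num
            by_cases hxy : x + y = 15
            · rw [if_pos (by simp [hxy])]
              rw [ih rest2 (by simp at hl ⊢; omega) (frames ++ [[x, y]]),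
                pvAltSpare x y rest2 hx hxlt hxy]
              simp
            · rw [if_neg (by simp [hxy])]
              match rest2 with
              | [] =>
                simp [split_throws_into_frames_alt, hx, hxy, hxlt]
              | z :: rest3 =>
                by_cases hxy2 : x + y < 15
                · -- third throw: balls reaches 3, frame closes
                  simp only [List.foldl, pvStepA, if_pos hxy2]
                  norm_num
                  rw [ih rest3 (by simp at hl ⊢; omega) (frames ++ [[x, y, z]])]
                  simp [split_throws_into_frames_alt, hx, hxy, hxlt, hxy2]
                · -- overshoot after two throws: the frame never closes
                  simp only [List.foldl, pvStepA, if_neg hxy2]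
                  rw [if_neg (by simp [hxy])]
                  rw [pvStuck rest3 frames ([x, y] ++ [z]) 2 (x + y) hxy2
                    (by simp [hxy])]
                  simp [split_throws_into_frames_alt, hx, hxy, hxlt, hxy2]
          · -- overshoot on the very first throw: the frame never closes
            rw [pvStuck (y :: rest2) frames [x] 1 x hxlt (by simp [hx]),
              pvAltStuck1 x (y :: rest2) hx hxlt]
            simp

-- ===== VERDICT (by name: the statement is the Claim_ definition above) =====
theorem split_throws_into_frames_spec : Claim_equal_split_throws_into_frames := by
  intro throws _
  unfold Spec_split_throws_into_frames split_throws_into_frames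
  rw [pvMain throws.length throws le_rfl []]
  simp
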